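-- pv_equiv track=rewrite | github.com/philipjoubert/dojo-public | tools/generate-manifest.py | derive_url_template
-- ===== SOURCE A (Python) =====
-- def derive_url_template(index: dict[str, str]) -> str | None:
--     """If ≥80% of inbox URLs share a `<base>/<slug>` shape, return `<base>/`.
--
--     Lets disk-only articles (not present in inbox/_index.json) still get a
--     best-effort URL by assuming the persona writes on one platform with a
--     consistent URL scheme. If the data doesn't agree, returns None — we'd
--     rather ship an entry with no URL than a wrong one.
--     """
--     if not index:
--         return None
--     from collections import Counter
--     prefixes: Counter = Counter()
--     for slug, url in index.items():
--         if url.endswith('/' + slug):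
--             prefixes[url[:-len(slug)]] += 1
--     if not prefixes:
--         return None
--     (top_prefix, top_count), = prefixes.most_common(1)
--     if top_count / len(index) >= 0.8:
--         return top_prefix
--     return None
-- ===== SOURCE B (Python) =====
-- def derive_url_template(index: dict[str, str]) -> str | None:
--     """Sorted-median re-implementation: a prefix covering >=80% of the index is
--     a strict majority of the collected prefixes, so it must sit at the middle of
--     the sorted prefix list; verify its count against the threshold.
--     (5 * count >= 4 * len(index) is the exact integer form of count/len >= 0.8.)"""
--     if not index:
--         return None
--     prefixes = []
--     for slug, url in index.items():
--         if url.endswith('/' + slug):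
--             prefixes.append(url[:-len(slug)])
--     if not prefixes:
--         return None
--     prefixes.sort()
--     candidate = prefixes[len(prefixes) // 2]
--     if 5 * prefixes.count(candidate) >= 4 * len(index):
--         return candidate
--     return None
-- ===== Notes on version B (the rewrite author's own statement) =====
-- stated objective: alternative
-- what changed: Replaces Counter + most_common(1) by collecting the prefixes into a plain list, sorting it and probing the median element (a prefix covering >=80% of the index is a strict majority of the prefixes, so it must occupy the middle of the sorted list), then verifying its count against the threshold in exact integer arithmetic (5*count >= 4*n).
import Mathlib
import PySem

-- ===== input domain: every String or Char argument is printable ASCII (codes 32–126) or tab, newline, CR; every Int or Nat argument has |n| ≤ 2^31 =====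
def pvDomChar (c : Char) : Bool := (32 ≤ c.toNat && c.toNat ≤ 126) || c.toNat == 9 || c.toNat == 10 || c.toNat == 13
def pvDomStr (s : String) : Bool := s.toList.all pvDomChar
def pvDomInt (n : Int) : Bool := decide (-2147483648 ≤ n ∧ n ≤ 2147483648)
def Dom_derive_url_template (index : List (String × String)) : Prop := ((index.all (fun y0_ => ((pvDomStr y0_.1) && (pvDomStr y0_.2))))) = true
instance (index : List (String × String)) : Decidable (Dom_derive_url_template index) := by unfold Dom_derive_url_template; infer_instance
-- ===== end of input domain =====

-- B replaces A's Counter + most_common(1) by sorting the collected prefix list and probing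
-- its median (a prefix covering ≥80% of the index is a strict majority of the prefixes, so
-- it must sit in the middle of the sorted list); objective 'alternative', same return value.

-- shared helpers of both ports: url.endswith('/' + slug) and url[:-len(slug)]
def pvMatches (slug url : String) : Bool :=
  PySem.Chars.endswith url.toList ('/' :: slug.toList)

def pvPrefix (slug url : String) : String :=
  String.ofList (PySem.List.slice url.toList none (some (-(slug.toList.length : Int))))


-- ===== PORT A =====
def derive_url_template (index : List (String × String)) : Option String :=
  let d := PySem.Dict.ofList index
  if d.items = [] then none
  else
    let prefixes : PySem.Dict String Int :=
      d.items.foldl (fun c p =>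
        if pvMatches p.1 p.2 then c.modify (pvPrefix p.1 p.2) 0 (· + 1) else c)
        PySem.Dict.empty
    if prefixes.items = [] then none
    else
      match PySem.List.sorted prefixes.items (fun q => q.2) true with
      | [] => none
      | (top_prefix, top_count) :: _ =>
        if 5 * top_count ≥ 4 * (d.size : Int) then some top_prefix else none


-- ===== PORT B =====
def derive_url_template_alt (index : List (String × String)) : Option String :=
  let d := PySem.Dict.ofList index
  if d.items = [] then none
  else
    let prefixes : List String :=
      d.items.foldl (fun acc p =>
        if pvMatches p.1 p.2 then acc ++ [pvPrefix p.1 p.2] else acc) []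
    if prefixes = [] then none
    else
      let s := PySem.List.sorted prefixes (fun x => x)
      let candidate := PySem.List.pyGetD s (PySem.Int.floordiv (s.length : Int) 2) ""
      if 5 * (s.count candidate : Int) ≥ 4 * (d.size : Int) then some candidate else none


-- ===== PRECONDITION & SPEC =====
def Spec_derive_url_template (index : List (String × String)) (out : Option String) : Prop := out = derive_url_template_alt index
instance (index : List (String × String)) (out : Option String) : Decidable (Spec_derive_url_template index out) := by unfold Spec_derive_url_template; infer_instance

-- ===== CLAIM (what is proved, stated in full; the proofs are below) =====
def Claim_equal_derive_url_template : Prop := ∀ (index : List (String × String)), Dom_derive_url_template index → Spec_derive_url_template index (derive_url_template index)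

-- ===== LEMMAS AND PROOFS =====

-- the list of prefixes both loops collect
def pvPrefixList (index : List (String × String)) : List String :=
  (((PySem.Dict.ofList index).items.filter (fun p => pvMatches p.1 p.2)).map
    (fun p => pvPrefix p.1 p.2))

lemma pvCounterEq (index : List (String × String)) :
    (PySem.Dict.ofList index).items.foldl (fun c p =>
        if pvMatches p.1 p.2 then c.modify (pvPrefix p.1 p.2) 0 (· + 1) else c)
        PySem.Dict.empty
      = PySem.Dict.counter (pvPrefixList index) := by
  rw [PySem.List.foldl_if_eq_foldl_filter, PySem.Dict.counter_eq_foldl, pvPrefixList,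
    List.foldl_map]

lemma pvListEq (index : List (String × String)) :
    (PySem.Dict.ofList index).items.foldl (fun acc p =>
        if pvMatches p.1 p.2 then acc ++ [pvPrefix p.1 p.2] else acc) []
      = pvPrefixList index := by
  rw [PySem.List.foldl_append_if, List.nil_append, pvPrefixList]


-- a strict-majority element of ps sits at index len/2 of sorted(ps)
lemma pvMedianOfMajority (ps : List String) (x : String)
    (hmaj : ps.length < 2 * ps.count x)
    (hm : ps.length / 2 < (PySem.List.sorted ps (fun y => y)).length) :
    (PySem.List.sorted ps (fun y => y))[ps.length / 2]'hm = x := by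
  have hslen : (PySem.List.sorted ps (fun y => y)).length = ps.length :=
    PySem.List.length_sorted ps (fun y => y) false
  have hcount : (PySem.List.sorted ps (fun y => y)).count x = ps.count x :=
    (PySem.List.sorted_perm ps (fun y => y) false).count_eq x
  by_contra hne
  rcases lt_or_gt_of_ne hne with hlt | hgt
  · -- median < x : every occurrence of x is past index len/2
    have htz : ((PySem.List.sorted ps (fun y => y)).take (ps.length / 2 + 1)).count x = 0 := by
      rw [List.count_eq_zero]
      intro hx
      obtain ⟨i, hi, hieq⟩ := List.mem_iff_getElem.mp hx
      have hile : i ≤ ps.length / 2 := by simp [List.length_take] at hi; omega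
      have hi' : i < (PySem.List.sorted ps (fun y => y)).length := by omega
      have hieq' : (PySem.List.sorted ps (fun y => y))[i]'hi' = x := by
        simpa [List.getElem_take] using hieq
      have hmono := PySem.List.sorted_id_getElem_mono ps hile hm
      exact absurd hlt (not_lt.mpr (Eq.trans_le hieq'.symm hmono))
    have hsplit := List.count_append (l₁ := (PySem.List.sorted ps (fun y => y)).take (ps.length / 2 + 1))
      (l₂ := (PySem.List.sorted ps (fun y => y)).drop (ps.length / 2 + 1)) (a := x)
    rw [List.take_append_drop] at hsplit
    have hle := List.count_le_length (l := (PySem.List.sorted ps (fun y => y)).drop (ps.length / 2 + 1)) (a := x)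
    rw [List.length_drop] at hle
    omega
  · -- x < median : every occurrence of x is before index len/2
    have hdz : ((PySem.List.sorted ps (fun y => y)).drop (ps.length / 2)).count x = 0 := by
      rw [List.count_eq_zero]
      intro hx
      obtain ⟨i, hi, hieq⟩ := List.mem_iff_getElem.mp hx
      have hi2 : ps.length / 2 + i < (PySem.List.sorted ps (fun y => y)).length := by
        rw [List.length_drop] at hi; omega
      have hieq' : (PySem.List.sorted ps (fun y => y))[ps.length / 2 + i]'hi2 = x := by
        simpa [List.getElem_drop] using hieq
      have hmono := PySem.List.sorted_id_getElem_mono ps (Nat.le_add_right (ps.length / 2) i) hi2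
      exact absurd hgt (not_lt.mpr (le_of_le_of_eq hmono hieq'))
    have hsplit := List.count_append (l₁ := (PySem.List.sorted ps (fun y => y)).take (ps.length / 2))
      (l₂ := (PySem.List.sorted ps (fun y => y)).drop (ps.length / 2)) (a := x)
    rw [List.take_append_drop] at hsplit
    have hle := List.count_le_length (l := (PySem.List.sorted ps (fun y => y)).take (ps.length / 2)) (a := x)
    rw [List.length_take] at hle
    omega

theorem pvMainEq (index : List (String × String)) :
    derive_url_template index = derive_url_template_alt index := by
  by_cases hd : (PySem.Dict.ofList index).items = []
  · simp [derive_url_template, derive_url_template_alt, hd]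
  · by_cases hps : pvPrefixList index = []
    · simp only [derive_url_template, derive_url_template_alt, pvCounterEq, pvListEq, hps,
        if_neg hd]
      rfl
    · have hc_items := PySem.Dict.items_counter (pvPrefixList index)
      have hitems_ne : ¬ (PySem.Dict.counter (pvPrefixList index)).items = [] := by
        rw [hc_items]
        simp only [List.map_eq_nil_iff]
        intro h
        rcases List.exists_mem_of_ne_nil _ hps with ⟨p, hp⟩
        have hmem : p ∈ PySem.Set.ofList (pvPrefixList index) :=
          (PySem.Set.mem_ofList _ _).mpr hp
        rw [h] at hmem
        exact absurd hmem (List.not_mem_nil)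
      cases hsorted : PySem.List.sorted (PySem.Dict.counter (pvPrefixList index)).items (fun q => q.2) true with
      | nil => exact absurd ((PySem.List.sorted_eq_nil_iff _ _ _).mp hsorted) hitems_ne
      | cons hd0 tl =>
        obtain ⟨tp, tc⟩ := hd0
        have hmemhd : (tp, tc) ∈ (PySem.Dict.counter (pvPrefixList index)).items := by
          rw [← PySem.List.mem_sorted _ (fun q => q.2) true, hsorted]
          exact List.mem_cons_self
        rw [hc_items] at hmemhd
        obtain ⟨k, hkmem, hkeq⟩ := List.mem_map.mp hmemhd
        have htp : k = tp := congrArg Prod.fst hkeq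
        have htc : ((List.count k (pvPrefixList index) : Nat) : Int) = tc := congrArg Prod.snd hkeq
        subst htp
        subst htc
        have htp_mem : k ∈ pvPrefixList index := (PySem.Set.mem_ofList _ _).mp hkmem
        have hmax : ∀ y ∈ pvPrefixList index,
            (List.count y (pvPrefixList index) : Int) ≤ (List.count k (pvPrefixList index) : Int) := by
          intro y hy
          have hym : (y, ((List.count y (pvPrefixList index) : Nat) : Int))
              ∈ (PySem.Dict.counter (pvPrefixList index)).items := by
            rw [hc_items]
            exact List.mem_map.mpr ⟨y, (PySem.Set.mem_ofList _ _).mpr hy, rfl⟩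
          simpa using PySem.List.key_head_sorted_rev_ge _ (fun q => q.2) hsorted _ hym
        have hslen : (PySem.List.sorted (pvPrefixList index) (fun x => x)).length
            = (pvPrefixList index).length :=
          PySem.List.length_sorted _ _ false
        have hpos : 0 < (pvPrefixList index).length := List.length_pos_of_ne_nil hps
        have hmlt : (pvPrefixList index).length / 2
            < (PySem.List.sorted (pvPrefixList index) (fun x => x)).length := by omega
        have hfd : PySem.Int.floordiv
              (((PySem.List.sorted (pvPrefixList index) (fun x => x)).length : Nat) : Int) 2
            = (((PySem.List.sorted (pvPrefixList index) (fun x => x)).length / 2 : Nat) : Int) := by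
          exact_mod_cast PySem.Int.floordiv_natCast
            (PySem.List.sorted (pvPrefixList index) (fun x => x)).length 2
        have hcand : PySem.List.pyGetD (PySem.List.sorted (pvPrefixList index) (fun x => x))
              (PySem.Int.floordiv ((PySem.List.sorted (pvPrefixList index) (fun x => x)).length : Int) 2) ""
            = (PySem.List.sorted (pvPrefixList index) (fun x => x))[(pvPrefixList index).length / 2]'hmlt := by
          rw [hfd, PySem.List.pyGetD_natCast, hslen, List.getD_eq_getElem _ _ hmlt]
        have hcmem : (PySem.List.sorted (pvPrefixList index) (fun x => x))[(pvPrefixList index).length / 2]'hmlt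
            ∈ pvPrefixList index := by
          rw [← PySem.List.mem_sorted _ (fun x => x) false]
          exact List.getElem_mem hmlt
        have hscount : (PySem.List.sorted (pvPrefixList index) (fun x => x)).count
              ((PySem.List.sorted (pvPrefixList index) (fun x => x))[(pvPrefixList index).length / 2]'hmlt)
            = (pvPrefixList index).count
              ((PySem.List.sorted (pvPrefixList index) (fun x => x))[(pvPrefixList index).length / 2]'hmlt) :=
          (PySem.List.sorted_perm _ _ false).count_eq _
        have hlenle : (pvPrefixList index).length ≤ (PySem.Dict.ofList index).size := by
          have hfl : (pvPrefixList index).length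
              = ((PySem.Dict.ofList index).items.filter (fun p => pvMatches p.1 p.2)).length := by
            simp [pvPrefixList]
          rw [hfl]
          exact List.length_filter_le _ _
        simp only [derive_url_template, derive_url_template_alt, pvCounterEq, pvListEq,
          if_neg hd, if_neg hitems_ne, if_neg hps, hsorted, hcand]
        by_cases h5 : 4 * ((PySem.Dict.ofList index).size : Int)
            ≤ 5 * (List.count k (pvPrefixList index) : Int)
        · have hcle : (pvPrefixList index).count k ≤ (pvPrefixList index).length :=
            List.count_le_length
          have hc1 : 0 < (pvPrefixList index).count k := List.count_pos_iff.mpr htp_mem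
          have hmaj : (pvPrefixList index).length < 2 * (pvPrefixList index).count k := by
            zify at hcle hc1 ⊢
            have hl : ((pvPrefixList index).length : Int)
                ≤ ((PySem.Dict.ofList index).size : Int) := by exact_mod_cast hlenle
            omega
          have hceq := pvMedianOfMajority (pvPrefixList index) k hmaj hmlt
          rw [hceq] at hscount ⊢
          rw [hscount]
        · rw [if_neg h5]
          have hble := hmax _ hcmem
          rw [hscount]
          have hnc : ¬ (4 * ((PySem.Dict.ofList index).size : Int)
              ≤ 5 * (List.count ((PySem.List.sorted (pvPrefixList index) (fun x => x))[(pvPrefixList index).length / 2]'hmlt) (pvPrefixList index) : Int)) := by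
            intro hcon
            exact h5 (le_trans hcon (mul_le_mul_of_nonneg_left hble (by norm_num)))
          rw [if_neg hnc]

-- ===== VERDICT (by name: the statement is the Claim_ definition above) =====
theorem derive_url_template_spec : Claim_equal_derive_url_template := by
  intro index _
  exact pvMainEq index
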